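-- pv_equiv track=rewrite | github.com/alexandraback/datacollection | solutions_5695413893988352_0/Python/zfhrp6/Bsmall.py | make3
-- ===== SOURCE A (Python) =====
-- def make3(s):
--     ret = []
--     for i in range(10):
--         tmps = s[:s.index('?')] + str(i) + s[s.index('?')+1:]
--         for j in range(10):
--             tmpss = tmps[:tmps.index('?')] + str(j) + tmps[tmps.index('?')+1:]
--             for k in range(10):
--                 ret.append(tmpss.replace('?', str(k)))
--     return ret
-- ===== SOURCE B (Python) =====
-- def make3(s):
--     def go(t, depth):
--         if depth == 0:
--             return [t.replace('?', d) for d in "0123456789"]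
--         p = t.index('?')
--         return [r for d in "0123456789"
--                   for r in go(t[:p] + d + t[p+1:], depth - 1)]
--     return go(s, 2)
-- ===== Notes on version B (the rewrite author's own statement) =====
-- stated objective: alternative
-- what changed: B replaces A's three hard-coded nested loops by a recursive expander go(t, depth) that substitutes the first '?' with each digit and recurses, with a base case that replaces all remaining '?'; the enumeration becomes structural recursion on the number of staged passes instead of a fixed triple loop.
-- outside the precondition, e.g. on make3('?'): A raises ValueError, B raises ValueError
import Mathlib
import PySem

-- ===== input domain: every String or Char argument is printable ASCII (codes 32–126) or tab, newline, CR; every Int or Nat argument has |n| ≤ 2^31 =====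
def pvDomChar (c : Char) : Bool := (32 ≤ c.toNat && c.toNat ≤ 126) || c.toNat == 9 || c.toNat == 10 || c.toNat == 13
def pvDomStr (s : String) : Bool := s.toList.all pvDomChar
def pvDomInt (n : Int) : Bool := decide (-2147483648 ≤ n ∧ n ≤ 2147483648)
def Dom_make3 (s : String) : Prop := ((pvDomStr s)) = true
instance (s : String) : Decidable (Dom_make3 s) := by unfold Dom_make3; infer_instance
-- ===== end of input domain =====

-- B enumerates by a recursive expander (substitute the first '?' per level, replace-all at the
-- base) instead of A's three hard-coded nested loops; objective: alternative (same cost).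

-- ===== PORT A =====
-- A's loops, on the character list (string ops are PySem.Chars; s.index('?') is
-- PySem.Chars.find, exact here because Pre_ guarantees '?' is present at each call)
def make3core (cs : List Char) : List (List Char) :=
  (PySem.List.pyRange 0 10 1).foldl (fun ret i =>
    let tmps := PySem.Chars.slice cs none (some (PySem.Chars.find cs ['?'])) ++
                PySem.Int.toChars i ++
                PySem.Chars.slice cs (some (PySem.Chars.find cs ['?'] + 1)) none
    (PySem.List.pyRange 0 10 1).foldl (fun ret j =>
      let tmpss := PySem.Chars.slice tmps none (some (PySem.Chars.find tmps ['?'])) ++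
                   PySem.Int.toChars j ++
                   PySem.Chars.slice tmps (some (PySem.Chars.find tmps ['?'] + 1)) none
      (PySem.List.pyRange 0 10 1).foldl (fun ret k =>
        ret ++ [PySem.Chars.replace tmpss ['?'] (PySem.Int.toChars k)]) ret) ret) []

def make3 (s : String) : List String := (make3core s.toList).map String.ofList

-- ===== PORT B =====
-- the string literal "0123456789" B iterates over
def pvDigits : List Char := ['0','1','2','3','4','5','6','7','8','9']

-- Source B's inner 'go(t, depth)': base case replaces all remaining '?', recursive case
-- substitutes the first '?' (at p = t.index('?')) with each digit and recurses
def make3goB : List Char → Nat → List (List Char)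
  | cs, 0 => pvDigits.map (fun d => PySem.Chars.replace cs ['?'] [d])
  | cs, n + 1 =>
      let p := PySem.Chars.find cs ['?']
      pvDigits.flatMap (fun d =>
        make3goB (PySem.Chars.slice cs none (some p) ++ [d] ++
                  PySem.Chars.slice cs (some (p + 1)) none) n)

def make3_alt (s : String) : List String := (make3goB s.toList 2).map String.ofList

-- ===== PRECONDITION & SPEC =====
-- Pre_ excludes exactly the strings with fewer than two '?', on which A raises ValueError
def Pre_make3 (s : String) : Prop := 2 ≤ s.toList.count '?'
instance (s : String) : Decidable (Pre_make3 s) := by unfold Pre_make3; infer_instance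
def pvWitness_make3 : String := "a?b?c"
def Spec_make3 (s : String) (out : List String) : Prop := out = make3_alt s
instance (s : String) (out : List String) : Decidable (Spec_make3 s out) := by unfold Spec_make3; infer_instance

-- ===== CLAIM (what is proved, stated in full; the proofs are below) =====
def Claim_equal_make3 : Prop := ∀ (s : String), Dom_make3 s → Pre_make3 s → Spec_make3 s (make3 s)

-- ===== LEMMAS AND PROOFS =====

-- find of a single character that occurs: it returns the length of the '?'-free prefix
lemma find_go_single (c : Char) (r : List Char) (a : List Char) (ha : c ∉ a) :
    ∀ k : Nat, PySem.Chars.find.go [c] (a ++ c :: r) k = ((k + a.length : Nat) : Int) := by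
  induction a with
  | nil =>
    intro k
    simp [PySem.Chars.find.go, List.isPrefixOf]
  | cons x a ih =>
    intro k
    have hx : x ≠ c := by rintro rfl; exact ha (List.mem_cons_self)
    have hxr : ¬ (List.isPrefixOf [c] (x :: (a ++ c :: r))) = true := by
      simp [List.isPrefixOf]
      exact fun h => (hx h.symm).elim
    simp only [List.cons_append, PySem.Chars.find.go, hxr]
    rw [ih (fun h => ha (List.mem_cons_of_mem _ h)) (k + 1)]
    simp only [List.length_cons]
    push_cast
    omega

lemma find_single (c : Char) (a r : List Char) (ha : c ∉ a) :
    PySem.Chars.find (a ++ c :: r) [c] = (a.length : Int) := by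
  have := find_go_single c r a ha 0
  simpa [PySem.Chars.find] using this

-- single-character replace as a flatMap
lemma replace_go_single (c : Char) (new : List Char) :
    ∀ (s : List Char) (fuel : Nat), s.length ≤ fuel → ∀ acc : List Char,
      PySem.Chars.replace.go [c] new fuel s acc =
        acc.reverse ++ s.flatMap (fun x => if x = c then new else [x]) := by
  intro s
  induction s with
  | nil =>
    intro fuel _ acc
    cases fuel <;> simp [PySem.Chars.replace.go]
  | cons x t ih =>
    intro fuel hf acc
    cases fuel with
    | zero => simp at hf
    | succ f =>
      by_cases hx : x = c
      · subst hx
        have hp : (List.isPrefixOf [x] (x :: t)) = true := by simp [List.isPrefixOf]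
        simp only [PySem.Chars.replace.go, hp, if_pos]
        rw [show List.drop [x].length (x :: t) = t from rfl]
        rw [ih f (by simpa using Nat.succ_le_succ_iff.mp hf) (new.reverse ++ acc)]
        simp
      · have hp : ¬ (List.isPrefixOf [c] (x :: t)) = true := by
          simp [List.isPrefixOf]
          exact fun h => (hx h.symm).elim
        simp only [PySem.Chars.replace.go, hp]
        rw [ih f (by simpa using Nat.succ_le_succ_iff.mp hf) (x :: acc)]
        simp [hx]

lemma replace_single (c : Char) (s new : List Char) :
    PySem.Chars.replace s [c] new = s.flatMap (fun x => if x = c then new else [x]) := by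
  simpa [PySem.Chars.replace] using replace_go_single c new s s.length le_rfl []

lemma flatMap_id_of_not_mem (c : Char) (new : List Char) (a : List Char) (ha : c ∉ a) :
    a.flatMap (fun x => if x = c then new else [x]) = a := by
  induction a with
  | nil => simp
  | cons x t ih =>
    have hx : x ≠ c := fun h => ha (h ▸ List.mem_cons_self)
    simp [hx, ih (fun h => ha (List.mem_cons_of_mem _ h))]

-- two '?'s split the string into prefix / mid / tail
lemma split_two (cs : List Char) (h : 2 ≤ cs.count '?') :
    ∃ a b t, cs = a ++ '?' :: (b ++ '?' :: t) ∧ '?' ∉ a ∧ '?' ∉ b := by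
  have h1 : '?' ∈ cs := List.count_pos_iff.mp (by omega)
  obtain ⟨k, hk⟩ := Option.isSome_iff_exists.mp ((PySem.List.index?_isSome_iff cs '?').mpr h1)
  obtain ⟨a, suf, rfl, -, ha⟩ := (PySem.List.index?_eq_some_iff cs '?' k).mp hk
  have hca : a.count '?' = 0 := List.count_eq_zero.mpr ha
  have h2 : 1 ≤ suf.count '?' := by
    have := h
    simp [List.count_append, hca] at this ⊢
    omega
  have h3 : '?' ∈ suf := List.count_pos_iff.mp (by omega)
  obtain ⟨k', hk'⟩ := Option.isSome_iff_exists.mp ((PySem.List.index?_isSome_iff suf '?').mpr h3)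
  obtain ⟨b, t, rfl, -, hb⟩ := (PySem.List.index?_eq_some_iff suf '?' k').mp hk'
  exact ⟨a, b, t, rfl, ha, hb⟩

-- slices of a decomposed string
lemma drop_pre (a : List Char) (x : Char) (r : List Char) :
    (a ++ x :: r).drop (a.length + 1) = r := by
  rw [show a ++ x :: r = (a ++ [x]) ++ r by simp, List.drop_left']
  simp

-- the first-'?'-substitution step both programs perform
lemma stepA (a r d : List Char) (ha : '?' ∉ a) :
    PySem.Chars.slice (a ++ '?' :: r) none (some (PySem.Chars.find (a ++ '?' :: r) ['?'])) ++
      d ++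
      PySem.Chars.slice (a ++ '?' :: r) (some (PySem.Chars.find (a ++ '?' :: r) ['?'] + 1)) none
    = (a ++ d) ++ r := by
  rw [find_single '?' a r ha]
  have h1 : ((a.length : Int) + 1) = ((a.length + 1 : Nat) : Int) := by push_cast; omega
  rw [h1]
  simp only [PySem.Chars.slice_eq_listSlice, PySem.List.slice_to_natCast,
    PySem.List.slice_from_natCast]
  rw [List.take_left' rfl, drop_pre]

-- membership in range(10)
lemma mem_range10 (i : Int) (hi : i ∈ PySem.List.pyRange 0 10 1) :
    '?' ∉ PySem.Int.toChars i := by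
  have : PySem.List.pyRange 0 10 1 = [0,1,2,3,4,5,6,7,8,9] := rfl
  rw [this] at hi
  fin_cases hi <;> decide

lemma digit_ne (x : Char) (hx : x ∈ pvDigits) : x ≠ '?' := by
  fin_cases hx <;> decide

-- characterization of A's core on a decomposed string
lemma A_char (a b t : List Char) (ha : '?' ∉ a) (hb : '?' ∉ b) :
    make3core (a ++ '?' :: (b ++ '?' :: t)) =
      (PySem.List.pyRange 0 10 1).flatMap (fun i =>
        (PySem.List.pyRange 0 10 1).flatMap (fun j =>
          (PySem.List.pyRange 0 10 1).map (fun k =>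
            a ++ PySem.Int.toChars i ++ (b ++ (PySem.Int.toChars j ++
              t.flatMap (fun x => if x = '?' then PySem.Int.toChars k else [x])))))) := by
  simp only [make3core, PySem.List.foldl_append_singleton_eq_map,
    PySem.List.foldl_append_eq_flatMap, List.nil_append]
  apply List.flatMap_congr
  intro i hi
  have hdi : '?' ∉ PySem.Int.toChars i := mem_range10 i hi
  rw [stepA a (b ++ '?' :: t) (PySem.Int.toChars i) ha]
  apply List.flatMap_congr
  intro j hj
  have hdj : '?' ∉ PySem.Int.toChars j := mem_range10 j hj
  have hre : (a ++ PySem.Int.toChars i) ++ (b ++ '?' :: t) =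
      ((a ++ PySem.Int.toChars i) ++ b) ++ '?' :: t := by simp
  have hpre : '?' ∉ (a ++ PySem.Int.toChars i) ++ b := by
    simp [ha, hb, hdi]
  rw [hre, stepA _ t (PySem.Int.toChars j) hpre]
  apply List.map_congr_left
  intro k _
  rw [replace_single]
  simp [List.flatMap_append, flatMap_id_of_not_mem _ _ _ ha,
    flatMap_id_of_not_mem _ _ _ hb, flatMap_id_of_not_mem _ _ _ hdi,
    flatMap_id_of_not_mem _ _ _ hdj]

-- one recursive step of B substitutes the first '?'
lemma B_step (a r : List Char) (ha : '?' ∉ a) (n : Nat) :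
    make3goB (a ++ '?' :: r) (n + 1) =
      pvDigits.flatMap (fun d => make3goB ((a ++ [d]) ++ r) n) := by
  simp only [make3goB]
  apply List.flatMap_congr
  intro d _
  rw [stepA a r [d] ha]

-- characterization of B's expander on a decomposed string
lemma B_char (a b t : List Char) (ha : '?' ∉ a) (hb : '?' ∉ b) :
    make3goB (a ++ '?' :: (b ++ '?' :: t)) 2 =
      pvDigits.flatMap (fun x =>
        pvDigits.flatMap (fun y =>
          pvDigits.map (fun z =>
            a ++ [x] ++ (b ++ ([y] ++
              t.flatMap (fun c => if c = '?' then [z] else [c])))))) := by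
  rw [B_step a _ ha]
  apply List.flatMap_congr
  intro x hx
  have hx' : '?' ∉ [x] := by
    simp only [List.mem_singleton]
    exact fun h => digit_ne x hx h.symm
  have hre : (a ++ [x]) ++ (b ++ '?' :: t) = ((a ++ [x]) ++ b) ++ '?' :: t := by simp
  have hpre : '?' ∉ (a ++ [x]) ++ b := by
    simp only [List.mem_append, not_or]
    exact ⟨⟨ha, hx'⟩, hb⟩
  rw [hre, B_step _ t hpre]
  apply List.flatMap_congr
  intro y hy
  have hy' : '?' ∉ [y] := by
    simp only [List.mem_singleton]
    exact fun h => digit_ne y hy h.symm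
  simp only [make3goB]
  apply List.map_congr_left
  intro z _
  rw [replace_single]
  simp [List.flatMap_append, flatMap_id_of_not_mem _ _ _ ha,
    flatMap_id_of_not_mem _ _ _ hb, digit_ne x hx, digit_ne y hy]

-- the two digit enumerations coincide
lemma bridge (a b t : List Char) :
    (PySem.List.pyRange 0 10 1).flatMap (fun i =>
        (PySem.List.pyRange 0 10 1).flatMap (fun j =>
          (PySem.List.pyRange 0 10 1).map (fun k =>
            a ++ PySem.Int.toChars i ++ (b ++ (PySem.Int.toChars j ++
              t.flatMap (fun x => if x = '?' then PySem.Int.toChars k else [x])))))) =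
      pvDigits.flatMap (fun x =>
        pvDigits.flatMap (fun y =>
          pvDigits.map (fun z =>
            a ++ [x] ++ (b ++ ([y] ++
              t.flatMap (fun c => if c = '?' then [z] else [c])))))) := by
  rfl

-- ===== VERDICT (by name: the statement is the Claim_ definition above) =====
theorem make3_spec : Claim_equal_make3 := by
  intro s _ hpre
  unfold Spec_make3 make3 make3_alt
  obtain ⟨a, b, t, hs, ha, hb⟩ := split_two s.toList hpre
  rw [hs, A_char a b t ha hb, bridge, ← B_char a b t ha hb]
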